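-- pv_equiv track=rewrite | github.com/ssong915/basline | DHGNN_code/utils/layer_utils.py | reindex_snapshot
-- ===== SOURCE A (Python) =====
-- def reindex_snapshot(snapshot_edges):
--     org_node_index = []
--     reindex_snapshot_edges = [[0 for _ in row] for row in snapshot_edges]
--     for i, edge in enumerate(snapshot_edges):
--         for j, node in enumerate(edge):
--             if node not in org_node_index:
--                 org_node_index.append(node)
--             new_idx = org_node_index.index(node)
--             reindex_snapshot_edges[i][j] = new_idx
--
--     return reindex_snapshot_edges, org_node_index
-- ===== SOURCE B (Python) =====
-- def reindex_snapshot(snapshot_edges):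
--     # Closed-form rank: the new index of a node is the number of DISTINCT nodes
--     # occurring strictly before its first occurrence in the flattened edge stream.
--     flat = [node for edge in snapshot_edges for node in edge]
--
--     def rank(node):
--         return len(set(flat[:flat.index(node)]))
--
--     reindex_snapshot_edges = [[rank(node) for node in edge] for edge in snapshot_edges]
--     # first-appearance order = ascending rank (rank is injective on distinct nodes)
--     org_node_index = sorted(set(flat), key=rank)
--     return reindex_snapshot_edges, org_node_index
-- ===== Notes on version B (the rewrite author's own statement) =====
-- stated objective: alternative
-- what changed: Drops A's incremental index table (membership test, append, list.index per node) entirely: B computes each node's new index by a closed-form formula -- the count of distinct nodes before its first occurrence in the flattened stream -- and recovers the ordered unique-node list by sorting the node set by that rank.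
import Mathlib
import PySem

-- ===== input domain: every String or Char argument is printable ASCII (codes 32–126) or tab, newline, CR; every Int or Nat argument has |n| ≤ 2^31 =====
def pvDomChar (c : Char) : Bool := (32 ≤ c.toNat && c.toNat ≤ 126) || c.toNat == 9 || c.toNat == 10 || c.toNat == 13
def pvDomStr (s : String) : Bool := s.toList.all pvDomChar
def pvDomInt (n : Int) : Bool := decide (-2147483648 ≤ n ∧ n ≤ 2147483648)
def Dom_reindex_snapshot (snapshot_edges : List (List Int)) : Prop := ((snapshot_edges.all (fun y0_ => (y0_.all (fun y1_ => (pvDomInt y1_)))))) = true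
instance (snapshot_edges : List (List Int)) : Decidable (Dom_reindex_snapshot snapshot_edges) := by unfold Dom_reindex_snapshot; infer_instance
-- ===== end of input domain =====

-- B drops A's incremental index table: each node's new index is computed by the closed-form
-- "count of distinct nodes before its first occurrence in the flattened stream", and the
-- unique-node list is the node set sorted by that rank; objective: alternative.

-- ===== PORT A =====
-- A preallocates a zero matrix and overwrites each cell [i][j] exactly once, left to right;
-- that fill is transcribed as building each row (and the row list) by appending in the same order.
-- `org_node_index.index(node)` cannot raise here (node was just ensured present): `.getD 0` is unreachable.
def aStepNode (s : List Int × List Int) (node : Int) : List Int × List Int :=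
  let org := if node ∈ s.1 then s.1 else s.1 ++ [node]
  let newIdx : Int := ((PySem.List.index? org node).getD 0 : Nat)
  (org, s.2 ++ [newIdx])

def aStepEdge (s : List Int × List (List Int)) (edge : List Int) : List Int × List (List Int) :=
  let r := edge.foldl aStepNode (s.1, [])
  (r.1, s.2 ++ [r.2])

def reindex_snapshot (snapshot_edges : List (List Int)) : List (List Int) × List Int :=
  let r := snapshot_edges.foldl aStepEdge ([], [])
  (r.2, r.1)

-- ===== PORT B =====
-- rank(node) = len(set(flat[:flat.index(node)])); `flat.index(node)` cannot raise where it is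
-- called (node ∈ flat): `.getD 0` is unreachable. flat[:k] with k = a nonneg list index is take k.
def bRank (flat : List Int) (node : Int) : Int :=
  PySem.Set.len (PySem.Set.ofList (flat.take ((PySem.List.index? flat node).getD 0)))

def reindex_snapshot_alt (snapshot_edges : List (List Int)) : List (List Int) × List Int :=
  let flat := snapshot_edges.flatMap (fun edge => edge)
  (snapshot_edges.map (fun edge => edge.map (fun node => bRank flat node)),
   PySem.List.sorted (PySem.Set.ofList flat) (fun node => bRank flat node) false)

-- ===== PRECONDITION & SPEC =====
def Spec_reindex_snapshot (snapshot_edges : List (List Int)) (out : List (List Int) × List Int) : Prop := out = reindex_snapshot_alt snapshot_edges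
instance (snapshot_edges : List (List Int)) (out : List (List Int) × List Int) : Decidable (Spec_reindex_snapshot snapshot_edges out) := by unfold Spec_reindex_snapshot; infer_instance

-- ===== CLAIM (what is proved, stated in full; the proofs are below) =====
def Claim_equal_reindex_snapshot : Prop := ∀ (snapshot_edges : List (List Int)), Dom_reindex_snapshot snapshot_edges → Spec_reindex_snapshot snapshot_edges (reindex_snapshot snapshot_edges)

-- ===== LEMMAS AND PROOFS =====

-- the value A ends up writing for node n, relative to a node list `all`
def gIdx (all : List Int) (n : Int) : Int := ((PySem.List.index? all n).getD 0 : Nat)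

theorem dedup_append_singleton (pre : List Int) (n : Int) :
    PySem.List.dedup (pre ++ [n]) = (if n ∈ PySem.List.dedup pre then PySem.List.dedup pre else PySem.List.dedup pre ++ [n]) := by
  simp [PySem.List.dedup_eq_ofList, PySem.Set.ofList_append, PySem.Set.update, PySem.Set.add,
    PySem.Set.contains]

theorem update_is_extension (ys : List Int) (s : PySem.Set Int) :
    ∃ t, PySem.Set.update s ys = s ++ t := by
  induction ys generalizing s with
  | nil => exact ⟨[], by simp [PySem.Set.update]⟩
  | cons y ys ih =>
    rw [PySem.Set.update_cons]
    by_cases h : PySem.Set.contains s y = true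
    · have hadd : PySem.Set.add s y = s := by rw [PySem.Set.add, if_pos h]
      rw [hadd]; exact ih s
    · have hadd : PySem.Set.add s y = s ++ [y] := by rw [PySem.Set.add, if_neg h]
      rw [hadd]
      obtain ⟨t, ht⟩ := ih (s ++ [y])
      exact ⟨[y] ++ t, by rw [ht]; simp⟩

theorem dedup_prefix (l m : List Int) :
    ∃ t, PySem.List.dedup (l ++ m) = PySem.List.dedup l ++ t := by
  rw [PySem.List.dedup_eq_ofList, PySem.List.dedup_eq_ofList, PySem.Set.ofList_append]
  exact update_is_extension m _

theorem gIdx_extend (l t : List Int) (n : Int) (hn : n ∈ l) :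
    gIdx (l ++ t) n = gIdx l n := by
  unfold gIdx
  rw [PySem.List.index?_append_of_mem t hn]

-- inner loop of A: processing one edge appends it to the dedup state and emits the final indices
theorem a_inner (edge : List Int) : ∀ (pre acc suf : List Int),
    edge.foldl aStepNode (PySem.List.dedup pre, acc)
    = (PySem.List.dedup (pre ++ edge),
       acc ++ edge.map (gIdx (PySem.List.dedup (pre ++ edge ++ suf)))) := by
  induction edge with
  | nil => intro pre acc suf; simp
  | cons n rest ih =>
    intro pre acc suf
    have hstep : aStepNode (PySem.List.dedup pre, acc) n
        = (PySem.List.dedup (pre ++ [n]),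
           acc ++ [gIdx (PySem.List.dedup (pre ++ (n :: rest) ++ suf)) n]) := by
      have horg : (if n ∈ PySem.List.dedup pre then PySem.List.dedup pre else PySem.List.dedup pre ++ [n])
          = PySem.List.dedup (pre ++ [n]) := (dedup_append_singleton pre n).symm
      have hmem : n ∈ PySem.List.dedup (pre ++ [n]) := by
        rw [PySem.List.mem_dedup]; simp
      have hsplit : pre ++ (n :: rest) ++ suf = (pre ++ [n]) ++ (rest ++ suf) := by simp
      obtain ⟨t, ht⟩ := dedup_prefix (pre ++ [n]) (rest ++ suf)
      have hidx : gIdx (PySem.List.dedup (pre ++ (n :: rest) ++ suf)) n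
          = gIdx (PySem.List.dedup (pre ++ [n])) n := by
        rw [hsplit, ht, gIdx_extend _ _ _ hmem]
      simp only [aStepNode, horg, hidx]
      rfl
    rw [List.foldl_cons, hstep, ih (pre ++ [n]) _ (suf)]
    simp

-- outer loop of A
theorem a_outer (es : List (List Int)) : ∀ (pre : List Int) (rows : List (List Int)),
    es.foldl aStepEdge (PySem.List.dedup pre, rows)
    = (PySem.List.dedup (pre ++ es.flatMap (fun e => e)),
       rows ++ es.map (fun e => e.map (gIdx (PySem.List.dedup (pre ++ es.flatMap (fun e => e)))))) := by
  induction es with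
  | nil => intro pre rows; simp
  | cons e rest ih =>
    intro pre rows
    have hflat : pre ++ (e :: rest).flatMap (fun x => x) = pre ++ e ++ rest.flatMap (fun x => x) := by
      simp
    have hstep : aStepEdge (PySem.List.dedup pre, rows) e
        = (PySem.List.dedup (pre ++ e),
           rows ++ [e.map (gIdx (PySem.List.dedup (pre ++ e ++ rest.flatMap (fun x => x))))]) := by
      simp only [aStepEdge, a_inner e pre [] (rest.flatMap (fun x => x))]
      simp
    rw [List.foldl_cons, hstep, ih (pre ++ e)]
    rw [hflat]
    simp

-- B's closed-form rank of n is exactly n's position in the ordered dedup of flat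
theorem index?_dedup_eq_rank (flat : List Int) (n : Int) (hn : n ∈ flat) :
    PySem.List.index? (PySem.List.dedup flat) n
      = some (PySem.List.dedup (flat.take ((PySem.List.index? flat n).getD 0))).length := by
  obtain ⟨k, hk⟩ := Option.isSome_iff_exists.mp ((PySem.List.index?_isSome_iff flat n).mpr hn)
  obtain ⟨pre, suf, hsplit, hlen, hnpre⟩ := (PySem.List.index?_eq_some_iff flat n k).mp hk
  have htake : flat.take ((PySem.List.index? flat n).getD 0) = pre := by
    rw [hk]; simp [hsplit, ← hlen]
  have hnpre' : n ∉ PySem.List.dedup pre := fun h => hnpre ((PySem.List.mem_dedup pre n).mp h)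
  have hofs : PySem.Set.ofList (pre ++ n :: suf)
      = PySem.Set.update (PySem.Set.ofList pre ++ [n]) suf := by
    rw [PySem.Set.ofList_append]
    have : PySem.Set.update (PySem.Set.ofList pre) (n :: suf)
        = PySem.Set.update (PySem.Set.add (PySem.Set.ofList pre) n) suf := by
      rw [PySem.Set.update_cons]
    rw [this]
    have hadd : PySem.Set.add (PySem.Set.ofList pre) n = PySem.Set.ofList pre ++ [n] := by
      rw [PySem.Set.add, if_neg]
      intro hc
      exact hnpre' (by simpa [PySem.List.dedup_eq_ofList] using (PySem.Set.contains_iff _ _).mp hc)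
    rw [hadd]
  obtain ⟨t, ht⟩ := update_is_extension suf (PySem.Set.ofList pre ++ [n])
  rw [htake, hsplit, PySem.List.dedup_eq_ofList, hofs, ht,
      PySem.List.index?_append_of_mem t (by simp : n ∈ PySem.Set.ofList pre ++ [n]),
      PySem.List.index?_append_singleton_self (PySem.Set.ofList pre) n
        (by simpa [PySem.List.dedup_eq_ofList] using hnpre'),
      PySem.List.dedup_eq_ofList]

theorem bRank_eq_gIdx (flat : List Int) (n : Int) (hn : n ∈ flat) :
    bRank flat n = gIdx (PySem.List.dedup flat) n := by
  unfold bRank gIdx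
  rw [index?_dedup_eq_rank flat n hn]
  simp [PySem.Set.len, PySem.List.dedup_eq_ofList]

-- position of the i-th element of a duplicate-free list
theorem index?_getElem_of_nodup (d : List Int) (hnd : d.Nodup) (i : Nat) (hi : i < d.length) :
    PySem.List.index? d d[i] = some i := by
  apply (PySem.List.index?_eq_some_iff d d[i] i).mpr
  refine ⟨d.take i, d.drop (i+1), ?_, by simp [Nat.le_of_lt hi], ?_⟩
  · conv_lhs => rw [← List.take_append_drop i d]
    rw [List.drop_eq_getElem_cons hi]
  · intro h
    obtain ⟨j, hj, hje⟩ := List.getElem_of_mem h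
    have hjlt : j < i := lt_of_lt_of_le hj (by simp)
    rw [List.getElem_take] at hje
    exact absurd (hnd.getElem_inj_iff.mp hje) (by omega)

-- sorting the node set by the closed-form rank reproduces first-appearance order
theorem sorted_by_rank (flat : List Int) :
    PySem.List.sorted (PySem.Set.ofList flat) (fun node => bRank flat node) false
      = PySem.List.dedup flat := by
  apply PySem.List.sorted_eq_of_perm_of_pairwise_lt
  · rw [PySem.List.dedup_eq_ofList]
  · rw [List.pairwise_iff_getElem]
    intro i j hi hj hij
    have hnd := PySem.List.nodup_dedup flat
    have hmi : (PySem.List.dedup flat)[i] ∈ flat :=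
      (PySem.List.mem_dedup _ _).mp (List.getElem_mem hi)
    have hmj : (PySem.List.dedup flat)[j] ∈ flat :=
      (PySem.List.mem_dedup _ _).mp (List.getElem_mem hj)
    rw [bRank_eq_gIdx _ _ hmi, bRank_eq_gIdx _ _ hmj]
    unfold gIdx
    rw [index?_getElem_of_nodup _ hnd i hi, index?_getElem_of_nodup _ hnd j hj]
    simp
    exact_mod_cast hij

-- ===== VERDICT (by name: the statement is the Claim_ definition above) =====
theorem reindex_snapshot_spec : Claim_equal_reindex_snapshot := by
  intro es _
  unfold Spec_reindex_snapshot reindex_snapshot reindex_snapshot_alt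
  have ha := a_outer es [] []
  simp only [List.nil_append] at ha
  rw [show (([], []) : List Int × List (List Int)) = (PySem.List.dedup [], []) from rfl]
  rw [ha]
  refine Prod.ext ?_ ?_
  · simp only
    apply List.map_congr_left
    intro e he
    apply List.map_congr_left
    intro n hn
    have hmem : n ∈ es.flatMap (fun e => e) := List.mem_flatMap.mpr ⟨e, he, hn⟩
    exact (bRank_eq_gIdx _ n hmem).symm
  · simp only
    exact (sorted_by_rank (es.flatMap (fun e => e))).symm
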